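-- pv_equiv track=rewrite | github.com/pypi-data/pypi-mirror-296 | packages/mysql-compare/mysql_compare-0.6.10.tar.gz/mysql_compare-0.6.10/test/test_sql.py | get_sqltext
-- ===== SOURCE A (Python) =====
-- def get_sqltext(keycols: list[tuple[str, str]], ckpt_row: dict = None):
--     _keyval = ckpt_row
--     _key_colns = ", ".join([f"`{col[0]}`" for col in keycols])
--     params: list = []
--     where_clause = ""
--     src_database = "db"
--     src_table = "tab1"
--     limit_size = 6000
--     # select * from where 1 = 1 and ((a > xxx) or (a = xxx and b > yyy) or (a = xxx and b = yyy and c > zzz)) order by a,b,c limit checksize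
--
--     if _keyval:
--         where_conditions = []
--         for end_idx in range(len(keycols)):
--             condition_parts = []
--             for i, (column_name, column_type) in enumerate(keycols[: end_idx + 1]):
--                 operator = ">" if i == end_idx else "="
--                 if column_type in ["int", "double", "char", "date", "decimal"]:
--                     condition_parts.append(f"`{column_name}` {operator} %s")
--                     params.append(ckpt_row[column_name])
--                 else:
--                     raise ValueError(f"Data type: [{column_type}] is not supported yet.")
--
--             where_conditions.append(" and ".join(condition_parts))
--         where_clause = "WHERE" + "(" + ") or (".join(where_conditions) + ") "
--
--     statement = f"SELECT {_key_colns} FROM {src_database}.{src_table} {where_clause}ORDER BY {_key_colns} LIMIT {limit_size}"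
--     return statement
-- ===== SOURCE B (Python) =====
-- def get_sqltext(keycols: list[tuple[str, str]], ckpt_row: dict = None):
--     _key_colns = ", ".join(f"`{col}`" for col, _ in keycols)
--     where_clause = ""
--     if ckpt_row:
--         supported = {"int", "double", "char", "date", "decimal"}
--         conditions = []
--         eq_prefix = ""
--         for column_name, column_type in keycols:
--             if column_type not in supported:
--                 raise ValueError(f"Data type: [{column_type}] is not supported yet.")
--             conditions.append(f"{eq_prefix}`{column_name}` > %s")
--             eq_prefix += f"`{column_name}` = %s and "
--         where_clause = "WHERE(" + ") or (".join(conditions) + ") "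
--     return f"SELECT {_key_colns} FROM db.tab1 {where_clause}ORDER BY {_key_colns} LIMIT {6000}"
-- ===== Notes on version B (the rewrite author's own statement) =====
-- stated objective: faster
-- what changed: Instead of rebuilding every WHERE disjunct by re-scanning the slice keycols[:end_idx+1] in a nested loop (and re-reading checkpoint values into an unused params list), B makes a single pass over keycols, maintaining the growing equality-prefix string and emitting each disjunct directly.
import Mathlib
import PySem

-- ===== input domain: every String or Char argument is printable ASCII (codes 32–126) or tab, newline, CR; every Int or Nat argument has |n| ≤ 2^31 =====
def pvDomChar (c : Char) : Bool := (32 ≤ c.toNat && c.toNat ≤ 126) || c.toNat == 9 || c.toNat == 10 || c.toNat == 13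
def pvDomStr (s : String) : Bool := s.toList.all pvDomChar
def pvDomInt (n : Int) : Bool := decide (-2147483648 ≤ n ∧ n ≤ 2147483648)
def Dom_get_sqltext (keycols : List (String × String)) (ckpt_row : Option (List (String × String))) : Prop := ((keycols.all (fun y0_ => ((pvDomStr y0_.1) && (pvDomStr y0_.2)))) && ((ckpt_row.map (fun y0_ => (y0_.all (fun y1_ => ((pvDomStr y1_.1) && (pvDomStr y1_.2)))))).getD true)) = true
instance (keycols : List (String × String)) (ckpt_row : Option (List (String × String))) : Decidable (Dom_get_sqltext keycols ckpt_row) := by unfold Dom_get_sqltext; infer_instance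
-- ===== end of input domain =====

-- B replaces A's nested re-scan of keycols[:end_idx+1] by a single pass that maintains the
-- growing equality-prefix string (objective: faster, one pass instead of a quadratic rebuild).


-- ===== PORT A =====
def pvSupportedTypesA : List String := ["int", "double", "char", "date", "decimal"]

-- inner loop: for i, (column_name, column_type) in enumerate(keycols[: end_idx + 1])
-- none = exception (ValueError on an unsupported type / KeyError on ckpt_row[column_name])
def pvInnerA (ckpt : List (String × String)) (end_idx : Nat) :
    List (String × String) → Nat → List String → List String → Option (List String × List String)
  | [], _, condition_parts, params => some (condition_parts, params)
  | (column_name, column_type) :: rest, i, condition_parts, params =>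
    let operator := if i == end_idx then ">" else "="
    if column_type ∈ pvSupportedTypesA then
      match (PySem.Dict.ofList ckpt).get? column_name with
      | some v =>
          pvInnerA ckpt end_idx rest (i + 1)
            (condition_parts ++ ["`" ++ column_name ++ "` " ++ operator ++ " %s"])
            (params ++ [v])
      | none => none
    else none

-- one iteration of A's outer loop (state = (where_conditions, params), none once an exception happened)
def pvStepA (keycols : List (String × String)) (ckpt : List (String × String))
    (st : Option (List String × List String)) (end_idx : Nat) : Option (List String × List String) :=
  match st with
  | none => none
  | some (where_conditions, params) =>
    match pvInnerA ckpt end_idx (keycols.take (end_idx + 1)) 0 [] params with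
    | some (condition_parts, params') =>
        some (where_conditions ++ [PySem.Str.join " and " condition_parts], params')
    | none => none

def get_sqltext (keycols : List (String × String)) (ckpt_row : Option (List (String × String))) : String :=
  let key_colns := PySem.Str.join ", " (keycols.map (fun col => "`" ++ col.1 ++ "`"))
  let src_database := "db"
  let src_table := "tab1"
  let limit_size : Int := 6000
  let where_clause :=
    match ckpt_row with
    | none => ""
    | some ckpt =>
      if ckpt.isEmpty then ""
      else
        match (List.range keycols.length).foldl (pvStepA keycols ckpt) (some ([], [])) with
        | some (where_conditions, _) =>
            "WHERE" ++ "(" ++ PySem.Str.join ") or (" where_conditions ++ ") "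
        | none => ""    -- exception path, excluded by Pre_get_sqltext
  "SELECT " ++ key_colns ++ " FROM " ++ src_database ++ "." ++ src_table ++ " " ++ where_clause
    ++ "ORDER BY " ++ key_colns ++ " LIMIT " ++ PySem.Int.toStr limit_size

-- ===== PORT B =====
def pvSupportedB : PySem.Set String := PySem.Set.ofList ["int", "double", "char", "date", "decimal"]

-- single pass: eq_prefix accumulates "`c` = %s and " for the columns already seen; none = ValueError
def pvLoopB : List (String × String) → String → List String → Option (List String)
  | [], _, conditions => some conditions
  | (column_name, column_type) :: rest, eq_prefix, conditions =>
    if column_type ∈ pvSupportedB then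
      pvLoopB rest (eq_prefix ++ "`" ++ column_name ++ "` = %s and ")
        (conditions ++ [eq_prefix ++ "`" ++ column_name ++ "` > %s"])
    else none

def get_sqltext_alt (keycols : List (String × String)) (ckpt_row : Option (List (String × String))) : String :=
  let key_colns := PySem.Str.join ", " (keycols.map (fun col => "`" ++ col.1 ++ "`"))
  let where_clause :=
    match ckpt_row with
    | none => ""
    | some ckpt =>
      if ckpt.isEmpty then ""
      else
        match pvLoopB keycols "" [] with
        | some conditions => "WHERE(" ++ PySem.Str.join ") or (" conditions ++ ") "
        | none => ""    -- exception path, excluded by Pre_get_sqltext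
  "SELECT " ++ key_colns ++ " FROM db.tab1 " ++ where_clause
    ++ "ORDER BY " ++ key_colns ++ " LIMIT " ++ PySem.Int.toStr 6000

-- ===== PRECONDITION & SPEC =====
-- Pre_ excludes exactly the inputs on which A raises: with a truthy (non-empty) ckpt_row, a column
-- whose type is unsupported (ValueError) or whose name is missing from ckpt_row (KeyError).
def Pre_get_sqltext (keycols : List (String × String)) (ckpt_row : Option (List (String × String))) : Prop :=
  ((ckpt_row.getD []).isEmpty
    || keycols.all (fun c =>
        (["int", "double", "char", "date", "decimal"] : List String).contains c.2
          && ((PySem.Dict.ofList (ckpt_row.getD [])).get? c.1).isSome)) = true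
instance (keycols : List (String × String)) (ckpt_row : Option (List (String × String))) : Decidable (Pre_get_sqltext keycols ckpt_row) := by unfold Pre_get_sqltext; infer_instance

def pvWitness_get_sqltext : (List (String × String)) × (Option (List (String × String))) :=
  ([("a", "int"), ("b", "char")], some [("a", "1"), ("b", "2")])

def Spec_get_sqltext (keycols : List (String × String)) (ckpt_row : Option (List (String × String))) (out : String) : Prop := out = get_sqltext_alt keycols ckpt_row
instance (keycols : List (String × String)) (ckpt_row : Option (List (String × String))) (out : String) : Decidable (Spec_get_sqltext keycols ckpt_row out) := by unfold Spec_get_sqltext; infer_instance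

-- ===== CLAIM (what is proved, stated in full; the proofs are below) =====
def Claim_equal_get_sqltext : Prop := ∀ (keycols : List (String × String)) (ckpt_row : Option (List (String × String))), Dom_get_sqltext keycols ckpt_row → Pre_get_sqltext keycols ckpt_row → Spec_get_sqltext keycols ckpt_row (get_sqltext keycols ckpt_row)

-- ===== LEMMAS AND PROOFS =====

-- the equality-prefix string after some columns, and the list of disjuncts B produces
def pvEqCat : List (String × String) → String
  | [] => ""
  | c :: rest => ("`" ++ c.1 ++ "` = %s and ") ++ pvEqCat rest

def pvConds : List (String × String) → String → List String
  | [], _ => []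
  | c :: rest, eq_prefix =>
      (eq_prefix ++ "`" ++ c.1 ++ "` > %s") :: pvConds rest (eq_prefix ++ "`" ++ c.1 ++ "` = %s and ")

lemma pvStrInj : Function.Injective String.toList := fun _ _ h => String.toList_inj.mp h

lemma pvLoopB_eq : ∀ (cols : List (String × String)) (pref : String) (conds : List String),
    (∀ c ∈ cols, c.2 ∈ pvSupportedB) →
    pvLoopB cols pref conds = some (conds ++ pvConds cols pref) := by
  intro cols
  induction cols with
  | nil => intro pref conds _; simp [pvLoopB, pvConds]
  | cons c rest ih =>
    intro pref conds h
    obtain ⟨cn, ct⟩ := c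
    have hc : ct ∈ pvSupportedB := h (cn, ct) (List.mem_cons_self ..)
    simp only [pvLoopB, if_pos hc]
    rw [ih _ _ (fun x hx => h x (List.mem_cons_of_mem _ hx))]
    simp [pvConds]

lemma pvInnerA_eq (ckpt : List (String × String)) :
    ∀ (cs : List (String × String)) (c : String × String) (i : Nat) (cp ps : List String),
    (∀ x ∈ cs ++ [c], x.2 ∈ pvSupportedTypesA ∧ ((PySem.Dict.ofList ckpt).get? x.1).isSome = true) →
    ∃ ps', pvInnerA ckpt (i + cs.length) (cs ++ [c]) i cp ps
      = some (cp ++ ((cs.map fun x => "`" ++ x.1 ++ "` " ++ "=" ++ " %s") ++ ["`" ++ c.1 ++ "` " ++ ">" ++ " %s"]), ps') := by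
  intro cs
  induction cs with
  | nil =>
    intro c i cp ps h
    obtain ⟨cn, ct⟩ := c
    obtain ⟨ht, hs⟩ := h (cn, ct) (by simp)
    obtain ⟨v, hv⟩ := Option.isSome_iff_exists.mp hs
    refine ⟨ps ++ [v], ?_⟩
    simp only [List.nil_append, List.length_nil, Nat.add_zero, pvInnerA, if_pos ht, hv,
      BEq.refl, List.map_nil]
    rfl
  | cons x rest ih =>
    intro c i cp ps h
    obtain ⟨cn, ct⟩ := x
    obtain ⟨ht, hs⟩ := h (cn, ct) (by simp)
    obtain ⟨v, hv⟩ := Option.isSome_iff_exists.mp hs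
    have harith : i + (rest.length + 1) = (i + 1) + rest.length := by omega
    obtain ⟨ps', hrec⟩ := ih c (i + 1) (cp ++ ["`" ++ cn ++ "` " ++ "=" ++ " %s"]) (ps ++ [v])
      (fun y hy => h y (List.mem_cons_of_mem _ hy))
    refine ⟨ps', ?_⟩
    simp only [List.cons_append, List.length_cons, pvInnerA, if_pos ht, hv]
    rw [if_neg (by simp only [beq_iff_eq]; omega), harith, hrec]
    simp

lemma pvConds_append : ∀ (xs : List (String × String)) (y : String × String) (pref : String),
    pvConds (xs ++ [y]) pref = pvConds xs pref ++ [pref ++ (pvEqCat xs ++ "`" ++ y.1 ++ "` > %s")] := by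
  intro xs
  induction xs with
  | nil =>
    intro y pref
    simp only [List.nil_append, pvConds, pvEqCat]
    apply List.map_injective_iff.mpr pvStrInj
    simp
  | cons x rest ih =>
    intro y pref
    simp only [List.cons_append, pvConds, ih, pvEqCat]
    apply List.map_injective_iff.mpr pvStrInj
    simp

lemma pvJoin_and : ∀ (cs : List (String × String)) (cn : String),
    PySem.Str.join " and " ((cs.map fun x => "`" ++ x.1 ++ "` " ++ "=" ++ " %s") ++ ["`" ++ cn ++ "` " ++ ">" ++ " %s"])
      = pvEqCat cs ++ "`" ++ cn ++ "` > %s" := by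
  intro cs
  induction cs with
  | nil =>
    intro cn
    rw [← String.toList_inj, PySem.Str.toList_join]
    simp [PySem.Chars.join_singleton, pvEqCat]
  | cons x rest ih =>
    intro cn
    rcases hq : ((rest.map fun x => "`" ++ x.1 ++ "` " ++ "=" ++ " %s") ++ ["`" ++ cn ++ "` " ++ ">" ++ " %s"]) with _ | ⟨q, qs⟩
    · exact absurd hq (by simp)
    · rw [← String.toList_inj, PySem.Str.toList_join]
      simp only [List.map_cons, List.cons_append, hq, PySem.Chars.join_cons_cons]
      rw [← List.map_cons, ← PySem.Str.toList_join, ← hq, ih]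
      simp [pvEqCat]

lemma pvFoldA_eq (keycols ckpt : List (String × String))
    (hAll : ∀ c ∈ keycols, c.2 ∈ pvSupportedTypesA ∧ ((PySem.Dict.ofList ckpt).get? c.1).isSome = true) :
    ∀ m, m ≤ keycols.length → ∀ ps0, ∃ ps',
      (List.range m).foldl (pvStepA keycols ckpt) (some ([], ps0))
        = some (pvConds (keycols.take m) "", ps') := by
  intro m
  induction m with
  | zero => intro _ ps0; exact ⟨ps0, by simp [pvConds]⟩
  | succ m ih =>
    intro hm ps0
    have hlt : m < keycols.length := hm
    obtain ⟨ps1, h1⟩ := ih (Nat.le_of_lt hlt) ps0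
    have htake : keycols.take (m + 1) = keycols.take m ++ [keycols[m]] := by
      rw [List.take_add_one, List.getElem?_eq_getElem hlt]
      rfl
    obtain ⟨ps2, h2⟩ := pvInnerA_eq ckpt (keycols.take m) keycols[m] 0 [] ps1
      (by
        intro x hx
        rcases List.mem_append.mp hx with hx | hx
        · exact hAll x (List.mem_of_mem_take hx)
        · simp at hx; subst hx; exact hAll _ (List.getElem_mem hlt))
    rw [show (0 : Nat) + (keycols.take m).length = m by
      simp [Nat.le_of_lt hlt]] at h2
    refine ⟨ps2, ?_⟩
    rw [List.range_succ, List.foldl_append, h1]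
    simp only [List.foldl_cons, List.foldl_nil, pvStepA, htake, h2, List.nil_append]
    rw [pvConds_append, pvJoin_and]
    simp only [Option.some.injEq, Prod.mk.injEq]
    refine ⟨?_, trivial⟩
    apply List.map_injective_iff.mpr pvStrInj
    simp

-- ===== VERDICT (by name: the statement is the Claim_ definition above) =====
theorem get_sqltext_spec : Claim_equal_get_sqltext := by
  intro keycols ckpt_row _hDom hPre
  show get_sqltext keycols ckpt_row = get_sqltext_alt keycols ckpt_row
  cases ckpt_row with
  | none =>
    simp only [get_sqltext, get_sqltext_alt]
    rw [← String.toList_inj]; simp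
  | some ckpt =>
    by_cases hnil : ckpt.isEmpty
    · simp only [get_sqltext, get_sqltext_alt, if_pos hnil]
      rw [← String.toList_inj]; simp
    · have hAll : ∀ c ∈ keycols, c.2 ∈ pvSupportedTypesA ∧
          ((PySem.Dict.ofList ckpt).get? c.1).isSome = true := by
        simp only [Pre_get_sqltext, Option.getD_some, Bool.or_eq_true, List.all_eq_true,
          Bool.and_eq_true] at hPre
        rcases hPre with h | h
        · exact absurd h hnil
        · intro c hc
          obtain ⟨h1, h2⟩ := h c hc
          exact ⟨by simpa [pvSupportedTypesA] using h1, h2⟩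
      obtain ⟨ps', hfold⟩ := pvFoldA_eq keycols ckpt hAll keycols.length le_rfl []
      rw [List.take_length] at hfold
      have hB := pvLoopB_eq keycols "" []
        (fun c hc => by
          have := (hAll c hc).1
          simpa [pvSupportedB, PySem.Set.mem_ofList, pvSupportedTypesA] using this)
      simp only [get_sqltext, get_sqltext_alt, if_neg hnil, hfold, hB]
      rw [← String.toList_inj]; simp
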